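-- pv_equiv track=rewrite | github.com/masterZarei/AI_Uni | HW3.py | maximum_prizes
-- ===== SOURCE A (Python) =====
-- def maximum_prizes(p):
--     total_prize = 0
--     while len(p) > 1:
--         n = len(p)
--         mid = n // 2
--
--         # تقسیم به دو دسته
--         first_half = p[:mid]
--         second_half = p[mid:]
--
--         # پیدا کردن بیشترین قدرت در هر دسته
--         max_first = max(first_half)
--         max_second = max(second_half)
--
--         # انتخاب دسته برای خداحافظی
--         if max_first > max_second:
--             total_prize += max_first
--             p = second_half  # خداحافظی با دسته اول
--         else:
--             total_prize += max_second
--             p = first_half   # خداحافظی با دسته دوم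
--
--     # اضافه کردن قدرت تیم آخر
--     total_prize += p[0]
--
--     return total_prize
-- ===== SOURCE B (Python) =====
-- def maximum_prizes(p):
--     def rmax(lo, hi):
--         m = p[lo]
--         for i in range(lo + 1, hi):
--             if p[i] > m:
--                 m = p[i]
--         return m
--
--     def go(lo, hi):
--         if hi - lo <= 1:
--             return p[lo]
--         mid = lo + (hi - lo) // 2
--         a = rmax(lo, mid)
--         b = rmax(mid, hi)
--         if a > b:
--             return a + go(mid, hi)
--         return b + go(lo, mid)
--
--     return go(0, len(p))
-- ===== Notes on version B (the rewrite author's own statement) =====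
-- stated objective: alternative
-- what changed: B never slices or mutates the list: it recurses on index ranges (lo, hi) into the original list, with a hand-written running-max scan over an index range replacing max() on sliced halves, instead of A's while-loop that repeatedly rebinds p to a sliced half and accumulates total_prize.
import Mathlib
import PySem

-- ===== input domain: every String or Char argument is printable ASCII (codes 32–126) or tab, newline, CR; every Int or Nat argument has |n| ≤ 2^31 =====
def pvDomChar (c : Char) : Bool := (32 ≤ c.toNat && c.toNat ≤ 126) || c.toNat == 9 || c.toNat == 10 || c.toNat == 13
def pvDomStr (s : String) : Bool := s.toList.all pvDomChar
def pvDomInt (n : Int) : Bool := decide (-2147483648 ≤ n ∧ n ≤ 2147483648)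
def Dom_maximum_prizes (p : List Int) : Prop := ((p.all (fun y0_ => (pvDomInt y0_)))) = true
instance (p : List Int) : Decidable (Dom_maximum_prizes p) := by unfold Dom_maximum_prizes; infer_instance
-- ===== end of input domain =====

-- B recurses on index ranges (lo, hi) into the original list with a hand-written running-max
-- scan, instead of A's while-loop that rebinds p to sliced halves (objective: alternative).

-- ===== PORT A =====
-- A's while-loop as tail recursion over the loop state (p, total_prize).
-- p[:mid]/p[mid:] with 0 ≤ mid ≤ len are exactly take/drop; max(l) on the nonempty
-- halves is (PySem.List.max? l (fun y => y)).getD 0; p[0] on the final nonempty list is headD 0.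
def maximum_prizes_loop (p : List Int) (total_prize : Int) : Int :=
  if p.length > 1 then
    let mid := p.length / 2
    let first_half := p.take mid
    let second_half := p.drop mid
    let max_first := (PySem.List.max? first_half (fun y => y)).getD 0
    let max_second := (PySem.List.max? second_half (fun y => y)).getD 0
    if max_first > max_second then
      maximum_prizes_loop second_half (total_prize + max_first)
    else
      maximum_prizes_loop first_half (total_prize + max_second)
  else
    total_prize + p.headD 0
termination_by p.length
decreasing_by
  · simp only [List.length_drop]; omega
  · simp only [List.length_take]; omega

def maximum_prizes (p : List Int) : Int := maximum_prizes_loop p 0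

-- ===== PORT B =====
-- rmax(lo, hi): p[lo] then the 'for i in range(lo+1, hi)' running-max update; all accesses
-- are in range under the callers' invariants, so p[i] is p.getD i 0 (exact there).
def pvRMax (p : List Int) (lo hi : Nat) : Int :=
  (List.range' (lo + 1) (hi - (lo + 1))).foldl
    (fun m i => if p.getD i 0 > m then p.getD i 0 else m) (p.getD lo 0)

-- go(lo, hi); in the base case Python returns p[lo] (IndexError when lo = hi = len,
-- i.e. the empty input — outside Pre_), here p.getD lo 0.
def pvGo (p : List Int) (lo hi : Nat) : Int :=
  if hi - lo ≤ 1 then p.getD lo 0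
  else
    let mid := lo + (hi - lo) / 2
    let a := pvRMax p lo mid
    let b := pvRMax p mid hi
    if a > b then a + pvGo p mid hi
    else b + pvGo p lo mid
termination_by hi - lo
decreasing_by
  · omega
  · omega

def maximum_prizes_alt (p : List Int) : Int := pvGo p 0 p.length

-- ===== PRECONDITION & SPEC =====
-- Pre_ excludes only the empty list, on which Python A raises IndexError (p[0]).
def Pre_maximum_prizes (p : List Int) : Prop := p ≠ []
instance (p : List Int) : Decidable (Pre_maximum_prizes p) := by unfold Pre_maximum_prizes; infer_instance
def pvWitness_maximum_prizes : List Int := [3, 1, 4]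

def Spec_maximum_prizes (p : List Int) (out : Int) : Prop := out = maximum_prizes_alt p
instance (p : List Int) (out : Int) : Decidable (Spec_maximum_prizes p out) := by unfold Spec_maximum_prizes; infer_instance

-- ===== CLAIM =====
def Claim_equal_maximum_prizes : Prop := ∀ (p : List Int), Dom_maximum_prizes p → Pre_maximum_prizes p → Spec_maximum_prizes p (maximum_prizes p)

-- ===== LEMMAS AND PROOFS =====

-- The index window [lo, hi) of p, as a list (hi ≤ p.length makes getD the real element).
def pvWin (p : List Int) (lo hi : Nat) : List Int :=
  (List.range' lo (hi - lo)).map (fun i => p.getD i 0)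

lemma pvWin_eq_slice (p : List Int) (lo hi : Nat) (hhi : hi ≤ p.length) :
    pvWin p lo hi = (p.drop lo).take (hi - lo) := by
  apply List.ext_getElem
  · simp [pvWin]; omega
  · intro i h1 h2
    simp only [pvWin, List.getElem_map, List.getElem_range', List.getElem_take,
      List.getElem_drop]
    have hi' : lo + 1 * i < p.length := by simp [pvWin] at h1; omega
    rw [List.getD_eq_getElem p 0 hi']
    congr 1
    omega

lemma pvWin_split (p : List Int) (lo mid hi : Nat) (h1 : lo ≤ mid) (h2 : mid ≤ hi) :
    pvWin p lo hi = pvWin p lo mid ++ pvWin p mid hi := by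
  unfold pvWin
  rw [← List.map_append]
  congr 1
  have : hi - lo = (mid - lo) + (hi - mid) := by omega
  rw [this, ← List.range'_append_1]
  congr 2
  omega

lemma pvWin_length (p : List Int) (lo hi : Nat) : (pvWin p lo hi).length = hi - lo := by
  simp [pvWin]

lemma pvRMax_eq_max (p : List Int) (lo hi : Nat) (h : lo < hi) :
    (PySem.List.max? (pvWin p lo hi) (fun y => y)).getD 0 = pvRMax p lo hi := by
  have hcons : pvWin p lo hi = p.getD lo 0 :: pvWin p (lo + 1) hi := by
    unfold pvWin
    have : hi - lo = 1 + (hi - (lo + 1)) := by omega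
    rw [this, ← List.range'_append_1, List.map_append]
    simp [List.range']
  rw [hcons, PySem.List.max?_id_cons]
  unfold pvWin pvRMax
  have hfun : (fun (m : Int) (i : Nat) => max m (p.getD i 0))
      = (fun m i => if p.getD i 0 > m then p.getD i 0 else m) := by
    funext m i
    simp only [max_def]
    split_ifs <;> omega
  rw [List.foldl_map, hfun]
  rfl

-- Loop invariant: A's loop run on the window [lo, hi) of p with accumulator `total`
-- returns total + B's go(lo, hi).
lemma loop_eq_go : ∀ (n lo hi : Nat) (p : List Int) (total : Int),
    hi - lo ≤ n → lo < hi → hi ≤ p.length →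
    maximum_prizes_loop (pvWin p lo hi) total = total + pvGo p lo hi := by
  intro n
  induction n with
  | zero => intro lo hi p total h hlt _; omega
  | succ n ih =>
    intro lo hi p total h hlt hhi
    rw [maximum_prizes_loop, pvGo]
    by_cases hbig : hi - lo ≤ 1
    · have h1 : hi = lo + 1 := by omega
      rw [if_neg (by rw [pvWin_length]; omega), if_pos hbig]
      subst h1
      simp [pvWin]
    · have hmidlt : lo < lo + (hi - lo) / 2 ∧ lo + (hi - lo) / 2 < hi := by omega
      set mid := lo + (hi - lo) / 2 with hmid
      rw [if_pos (by rw [pvWin_length]; omega), if_neg hbig]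
      have hlen2 : (pvWin p lo hi).length / 2 = mid - lo := by rw [pvWin_length]; omega
      have hsplit := pvWin_split p lo mid hi (by omega) (by omega)
      have htake : (pvWin p lo hi).take ((pvWin p lo hi).length / 2) = pvWin p lo mid := by
        rw [hlen2, hsplit, List.take_left' (by rw [pvWin_length])]
      have hdrop : (pvWin p lo hi).drop ((pvWin p lo hi).length / 2) = pvWin p mid hi := by
        rw [hlen2, hsplit, List.drop_left' (by rw [pvWin_length])]
      simp only [htake, hdrop,
        pvRMax_eq_max p lo mid (by omega), pvRMax_eq_max p mid hi (by omega)]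
      by_cases hc : pvRMax p lo mid > pvRMax p mid hi
      · rw [if_pos hc, if_pos hc, ih mid hi p _ (by omega) (by omega) hhi]
        ring
      · rw [if_neg hc, if_neg hc, ih lo mid p _ (by omega) (by omega) (by omega)]
        ring

lemma pvWin_self (p : List Int) : pvWin p 0 p.length = p := by
  rw [pvWin_eq_slice p 0 p.length le_rfl]
  simp

-- ===== VERDICT =====
theorem maximum_prizes_spec : Claim_equal_maximum_prizes := by
  intro p _ hpre
  unfold Spec_maximum_prizes maximum_prizes maximum_prizes_alt
  have hlen : 0 < p.length := List.length_pos_iff.mpr hpre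
  rw [← pvWin_self p, loop_eq_go p.length 0 p.length p 0 (by omega) hlen le_rfl]
  simp [pvWin_self]
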